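-- pv_equiv track=rewrite | github.com/hyeonjun/AlgorithmTest | ProGrammers/Lv3/level_3_Number_Game.py | solution
-- ===== SOURCE A (Python) =====
-- def solution(A, B):
--     answer = 0
--     B.sort(reverse=True)
--     A.sort(reverse=True)
--     for a in A:
--         scoreB = a
--         for b in B:
--             if a < b:
--                 scoreB = b
--             else:
--                 break
--         if scoreB == a:
--             continue
--         else:
--             B.remove(scoreB)
--             answer += 1
--
--     return answer
-- ===== SOURCE B (Python) =====
-- def solution(A, B):
--     # Two-pointer greedy on the descending-sorted lists: match each a (largest
--     # first) with the largest remaining b if it beats a.  O(n log n).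
--     A.sort(reverse=True)
--     B.sort(reverse=True)
--     j = 0
--     for a in A:
--         if j < len(B) and B[j] > a:
--             j += 1
--     return j
-- ===== Notes on version B (the rewrite author's own statement) =====
-- stated objective: faster
-- what changed: Replaces the quadratic rescanning-and-remove greedy (for each a, scan B for the smallest b beating a, then B.remove) by a single two-pointer pass over the descending-sorted lists that matches each a with the largest remaining b.
import Mathlib
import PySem

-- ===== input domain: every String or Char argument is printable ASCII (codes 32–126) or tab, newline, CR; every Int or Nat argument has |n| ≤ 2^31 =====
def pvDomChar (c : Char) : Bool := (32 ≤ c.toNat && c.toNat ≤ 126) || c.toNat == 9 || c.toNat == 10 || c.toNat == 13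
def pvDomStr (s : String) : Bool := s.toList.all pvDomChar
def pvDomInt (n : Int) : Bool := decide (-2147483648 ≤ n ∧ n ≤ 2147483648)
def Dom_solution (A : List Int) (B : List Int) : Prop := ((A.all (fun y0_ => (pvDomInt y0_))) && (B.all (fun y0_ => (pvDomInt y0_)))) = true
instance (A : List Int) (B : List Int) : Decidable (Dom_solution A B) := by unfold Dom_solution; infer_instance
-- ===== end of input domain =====

-- B replaces A's quadratic rescan-and-remove greedy by a two-pointer pass over the
-- descending-sorted lists (objective: faster, asymptotic). Python A sorts both
-- arguments in place and removes matched elements from B; B sorts both in place but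
-- does not remove: the equivalence proved here is about the RETURN value only.


-- ===== PORT A =====
-- inner loop: `scoreB = a; for b in B: if a < b: scoreB = b else: break`
def scoreLoop (a cur : Int) (bs : List Int) : Int :=
  match bs with
  | [] => cur
  | b :: t => if a < b then scoreLoop a b t else cur

-- outer loop over A, carrying the mutated B and `answer`
def solLoopA (bs : List Int) (as : List Int) (answer : Int) : Int :=
  match as with
  | [] => answer
  | a :: t =>
      let s := scoreLoop a a bs
      if s = a then solLoopA bs t answer
      -- B.remove(scoreB): scoreB was read from B here, so remove? is always `some`
      else solLoopA ((PySem.List.remove? bs s).getD bs) t (answer + 1)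

def solution (A : List Int) (B : List Int) : Int :=
  solLoopA (PySem.List.sorted B (fun x => x) true) (PySem.List.sorted A (fun x => x) true) 0

-- ===== PORT B =====
def solution_alt (A : List Int) (B : List Int) : Int :=
  let as := PySem.List.sorted A (fun x => x) true
  let bs := PySem.List.sorted B (fun x => x) true
  -- `j = 0; for a in as: if j < len(bs) and bs[j] > a: j += 1; return j`
  ((as.foldl (fun j a => if j < bs.length ∧ a < bs.getD j 0 then j + 1 else j) (0 : Nat) : Nat) : Int)

-- ===== PRECONDITION & SPEC =====
def Spec_solution (A : List Int) (B : List Int) (out : Int) : Prop := out = solution_alt A B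
instance (A : List Int) (B : List Int) (out : Int) : Decidable (Spec_solution A B out) := by unfold Spec_solution; infer_instance

-- ===== CLAIM (what is proved, stated in full; the proofs are below) =====
def Claim_equal_solution : Prop := ∀ (A : List Int) (B : List Int), Dom_solution A B → Spec_solution A B (solution A B)

-- ===== LEMMAS AND PROOFS =====

-- proof-side consuming form of B's two-pointer loop
def gRecN : List Int → List Int → Nat
  | [], _ => 0
  | _ :: t, [] => gRecN t []
  | a :: t, b :: bs => if a < b then gRecN t bs + 1 else gRecN t (b :: bs)

-- the invariant relation: equal, or both beyond the bound M (hence beyond every future a)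
def RelM (M x y : Int) : Prop := x = y ∨ (M < x ∧ M < y)

lemma relM_mono {M a x y : Int} (ha : a ≤ M) (h : RelM M x y) : RelM a x y := by
  rcases h with h | ⟨h1, h2⟩
  · exact Or.inl h
  · exact Or.inr ⟨lt_of_le_of_lt ha h1, lt_of_le_of_lt ha h2⟩

lemma scoreLoop_eq_getLastD (a : Int) : ∀ (bs : List Int) (c : Int),
    scoreLoop a c bs = (bs.takeWhile (fun b => decide (a < b))).getLastD c := by
  intro bs
  induction bs with
  | nil => intro c; rfl
  | cons b t ih =>
      intro c
      by_cases h : a < b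
      · rw [scoreLoop, if_pos h, List.takeWhile_cons, if_pos (by simpa using h), List.getLastD_cons]
        exact ih b
      · rw [scoreLoop, if_neg h, List.takeWhile_cons, if_neg (by simpa using h)]
        rfl

lemma getLastD_mem : ∀ (l : List Int) (c : Int), l ≠ [] → l.getLastD c ∈ l := by
  intro l
  induction l with
  | nil => simp
  | cons b t ih =>
      intro c _
      rw [List.getLastD_cons]
      rcases eq_or_ne t [] with ht | ht
      · subst ht; simp
      · exact List.mem_cons_of_mem b (ih b ht)

lemma ge_getLastD_of_sorted : ∀ (l : List Int) (c : Int), l.Pairwise (fun p q => q ≤ p) →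
    ∀ e ∈ l, l.getLastD c ≤ e := by
  intro l
  induction l with
  | nil => simp
  | cons b t ih =>
      intro c hp e he
      rcases List.pairwise_cons.mp hp with ⟨hb, ht⟩
      rw [List.getLastD_cons]
      by_cases h0 : t = []
      · subst h0
        have heb : e = b := by simpa using he
        subst heb
        simp
      · rcases List.mem_cons.mp he with heq | he'
        · subst heq
          exact hb _ (getLastD_mem t e h0)
        · exact ih b ht e he'

lemma all_eq_cons_dropLast : ∀ (l : List Int) (b : Int), (∀ e ∈ l, e = b) → l ≠ [] →
    l = b :: l.dropLast := by
  intro l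
  induction l with
  | nil => simp
  | cons x t ih =>
      intro b hall _
      have hx : x = b := hall x (by simp)
      subst hx
      rcases eq_or_ne t [] with h0 | h0
      · subst h0; simp
      · rw [List.dropLast_cons_of_ne_nil h0]
        exact congrArg (List.cons x) (ih x (fun e he => hall e (List.mem_cons_of_mem _ he)) h0)

lemma getLastD_default_irrel : ∀ (l : List Int) (c d : Int), l ≠ [] → l.getLastD c = l.getLastD d := by
  intro l c d h
  cases l with
  | nil => exact absurd rfl h
  | cons x t => rw [List.getLastD_cons, List.getLastD_cons]

-- erase of the last takeWhile element from a descending list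
lemma erase_getLastD_takeWhile (a : Int) : ∀ (bs : List Int),
    bs.Pairwise (fun p q => q ≤ p) →
    bs.takeWhile (fun b => decide (a < b)) ≠ [] →
    bs.erase ((bs.takeWhile (fun b => decide (a < b))).getLastD a)
      = (bs.takeWhile (fun b => decide (a < b))).dropLast ++ bs.dropWhile (fun b => decide (a < b)) := by
  intro bs
  induction bs with
  | nil => simp
  | cons b t ih =>
      intro hp htw
      rcases List.pairwise_cons.mp hp with ⟨hb, ht⟩
      by_cases hab : a < b
      · have htwc : (b :: t).takeWhile (fun b => decide (a < b)) = b :: t.takeWhile (fun b => decide (a < b)) := by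
          rw [List.takeWhile_cons, if_pos (by simpa using hab)]
        have hdwc : (b :: t).dropWhile (fun b => decide (a < b)) = t.dropWhile (fun b => decide (a < b)) := by
          rw [List.dropWhile_cons, if_pos (by simpa using hab)]
        rcases eq_or_ne (t.takeWhile (fun b => decide (a < b))) [] with h0 | h0
        · -- s = b; erase the head; dropWhile t = t
          have hdt : t.dropWhile (fun b => decide (a < b)) = t := by
            cases t with
            | nil => rfl
            | cons c t' =>
                have hc : ¬ (a < c) := by
                  by_contra hc
                  rw [List.takeWhile_cons, if_pos (by simpa using hc)] at h0
                  simp at h0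
                rw [List.dropWhile_cons, if_neg (by simpa using hc)]
          rw [htwc, h0, List.getLastD_cons, hdwc, hdt]
          simp [List.erase_cons_head]
        · -- takeWhile t nonempty
          set s := (t.takeWhile (fun b => decide (a < b))).getLastD b with hs
          have hsmem : s ∈ t.takeWhile (fun b => decide (a < b)) := getLastD_mem _ b h0
          have hsmemt : s ∈ t := (List.takeWhile_sublist _).subset hsmem
          have hsle : s ≤ b := hb s hsmemt
          have hsd : ((b :: t).takeWhile (fun b => decide (a < b))).getLastD a = s := by
            rw [htwc, List.getLastD_cons]
          rw [hsd, htwc, List.dropLast_cons_of_ne_nil h0, hdwc]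
          by_cases hbs : b = s
          · -- all takeWhile-t elements equal b = s: erasing the head is the same list
            have hmin : ∀ e ∈ t.takeWhile (fun b => decide (a < b)), s ≤ e := by
              intro e he
              exact ge_getLastD_of_sorted _ b (ht.sublist (List.takeWhile_sublist _)) e he
            have hall : ∀ e ∈ t.takeWhile (fun b => decide (a < b)), e = b := by
              intro e he
              have h1 : s ≤ e := hmin e he
              have h2 : e ≤ b := hb e ((List.takeWhile_sublist _).subset he)
              omega
            have hlist := all_eq_cons_dropLast _ b hall h0
            rw [← hbs, List.erase_cons_head]
            conv_lhs => rw [← List.takeWhile_append_dropWhile (p := fun b => decide (a < b)) (l := t), hlist]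
          · have hne : ¬ (b == s) := by simpa using hbs
            have hsa : (t.takeWhile (fun b => decide (a < b))).getLastD a = s := by
              rw [hs]
              exact getLastD_default_irrel _ a b h0
            rw [List.erase_cons_tail hne, ← hsa, ih ht h0]
            simp
      · exfalso; apply htw
        rw [List.takeWhile_cons, if_neg (by simpa using hab)]

lemma split_forall₂ (a M : Int) (ha : a ≤ M) : ∀ (l1 l2 : List Int), List.Forall₂ (RelM M) l1 l2 →
    (l1.takeWhile (fun b => decide (a < b))).length = (l2.takeWhile (fun b => decide (a < b))).length
    ∧ List.Forall₂ (RelM M) (l1.dropWhile (fun b => decide (a < b))) (l2.dropWhile (fun b => decide (a < b))) := by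
  intro l1 l2 h
  induction h with
  | nil => simp
  | @cons x y l1' l2' hxy hrest ih =>
      have hiff : (a < x) ↔ (a < y) := by
        rcases hxy with rfl | ⟨h1, h2⟩
        · exact Iff.rfl
        · exact ⟨fun _ => lt_of_le_of_lt ha h2, fun _ => lt_of_le_of_lt ha h1⟩
      by_cases hx : a < x
      · have hy : a < y := hiff.mp hx
        rw [List.takeWhile_cons, List.takeWhile_cons, List.dropWhile_cons, List.dropWhile_cons,
          if_pos (by simpa using hx), if_pos (by simpa using hy), if_pos (by simpa using hx),
          if_pos (by simpa using hy)]
        exact ⟨by simp [ih.1], ih.2⟩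
      · have hy : ¬ a < y := fun h' => hx (hiff.mpr h')
        rw [List.takeWhile_cons, List.takeWhile_cons, List.dropWhile_cons, List.dropWhile_cons,
          if_neg (by simpa using hx), if_neg (by simpa using hy), if_neg (by simpa using hx),
          if_neg (by simpa using hy)]
        exact ⟨rfl, List.Forall₂.cons hxy hrest⟩

lemma allgt_forall₂ (a : Int) : ∀ (l1 l2 : List Int), l1.length = l2.length →
    (∀ x ∈ l1, a < x) → (∀ y ∈ l2, a < y) → List.Forall₂ (RelM a) l1 l2 := by
  intro l1
  induction l1 with
  | nil =>
      intro l2 h _ _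
      cases l2 with
      | nil => exact List.Forall₂.nil
      | cons _ _ => simp at h
  | cons x t ih =>
      intro l2 h h1 h2
      cases l2 with
      | nil => simp at h
      | cons y t2 =>
          refine List.Forall₂.cons (Or.inr ⟨h1 x (by simp), h2 y (by simp)⟩) ?_
          exact ih t2 (by simpa using h) (fun e he => h1 e (by simp [he])) (fun e he => h2 e (by simp [he]))

lemma main_lemma : ∀ (as : List Int) (M : Int) (bsf bsg : List Int) (ans : Int),
    (∀ x ∈ as, x ≤ M) → as.Pairwise (fun p q => q ≤ p) →
    bsf.Pairwise (fun p q => q ≤ p) → bsg.Pairwise (fun p q => q ≤ p) →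
    List.Forall₂ (RelM M) bsf bsg →
    solLoopA bsf as ans = ans + (gRecN as bsg : Int) := by
  intro as
  induction as with
  | nil => intro M bsf bsg ans _ _ _ _ _; simp [solLoopA, gRecN]
  | cons a t ih =>
      intro M bsf bsg ans hle hpas hpf hpg hF
      have haM : a ≤ M := hle a (by simp)
      have hlet : ∀ x ∈ t, x ≤ a := (List.pairwise_cons.mp hpas).1
      have hpast : t.Pairwise (fun p q => q ≤ p) := (List.pairwise_cons.mp hpas).2
      cases hF with
      | nil =>
          -- both B-lists empty: scoreB stays a, skip
          rw [solLoopA]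
          simp only [scoreLoop]
          rw [show gRecN (a :: t) [] = gRecN t [] from rfl]
          exact ih a [] [] ans hlet hpast List.Pairwise.nil List.Pairwise.nil List.Forall₂.nil
      | @cons x b xs ys hxy hrest =>
          by_cases hab : a < b
          · -- a match: A removes the smallest beating b, B consumes the head
            have hax : a < x := by
              rcases hxy with rfl | ⟨h1, _⟩
              · exact hab
              · exact lt_of_le_of_lt haM h1
            have htwne : (x :: xs).takeWhile (fun b => decide (a < b)) ≠ [] := by
              rw [List.takeWhile_cons, if_pos (by simpa using hax)]
              simp
            have hscore : scoreLoop a a (x :: xs)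
                = ((x :: xs).takeWhile (fun b => decide (a < b))).getLastD a :=
              scoreLoop_eq_getLastD a (x :: xs) a
            set s := scoreLoop a a (x :: xs) with hsdef
            have hsmemtw : s ∈ (x :: xs).takeWhile (fun b => decide (a < b)) := by
              rw [hscore]; exact getLastD_mem _ a htwne
            have has : a < s := by simpa using List.mem_takeWhile_imp hsmemtw
            have hsne : ¬ s = a := by omega
            have hsmem : s ∈ x :: xs := (List.takeWhile_sublist _).subset hsmemtw
            have hremove : (PySem.List.remove? (x :: xs) s).getD (x :: xs) = (x :: xs).erase s := by
              rw [PySem.List.remove?_eq_some_erase (x :: xs) s hsmem]; rfl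
            have herase : (x :: xs).erase s
                = ((x :: xs).takeWhile (fun b => decide (a < b))).dropLast
                  ++ (x :: xs).dropWhile (fun b => decide (a < b)) := by
              rw [hscore]
              exact erase_getLastD_takeWhile a (x :: xs) hpf htwne
            -- step of A's loop
            rw [solLoopA]
            simp only [← hsdef, if_neg hsne, hremove, herase]
            -- step of B's loop
            rw [show gRecN (a :: t) (b :: ys) = gRecN t ys + 1 by rw [gRecN]; simp [hab]]
            -- apply IH at bound a
            have hsplit := split_forall₂ a M haM (x :: xs) (b :: ys) (List.Forall₂.cons hxy hrest)
            have htwg : (b :: ys).takeWhile (fun b => decide (a < b))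
                = b :: ys.takeWhile (fun b => decide (a < b)) := by
              rw [List.takeWhile_cons, if_pos (by simpa using hab)]
            have hdwg : (b :: ys).dropWhile (fun b => decide (a < b))
                = ys.dropWhile (fun b => decide (a < b)) := by
              rw [List.dropWhile_cons, if_pos (by simpa using hab)]
            have hlen : (((x :: xs).takeWhile (fun b => decide (a < b))).dropLast).length
                = (ys.takeWhile (fun b => decide (a < b))).length := by
              have h1 := hsplit.1
              rw [htwg] at h1
              rw [List.length_dropLast, h1]
              simp
            have hFnew : List.Forall₂ (RelM a)
                (((x :: xs).takeWhile (fun b => decide (a < b))).dropLast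
                  ++ (x :: xs).dropWhile (fun b => decide (a < b))) ys := by
              conv_rhs => rw [← List.takeWhile_append_dropWhile (p := fun b => decide (a < b)) (l := ys)]
              refine List.rel_append ?_ ?_
              · refine allgt_forall₂ a _ _ hlen ?_ ?_
                · intro e he
                  simpa using List.mem_takeWhile_imp ((List.dropLast_sublist _).subset he)
                · intro e he
                  simpa using List.mem_takeWhile_imp he
              · have h2 := hsplit.2
                rw [hdwg] at h2
                exact h2.imp (fun _ _ h => relM_mono haM h)
            have hpfnew : (((x :: xs).takeWhile (fun b => decide (a < b))).dropLast
                ++ (x :: xs).dropWhile (fun b => decide (a < b))).Pairwise (fun p q => q ≤ p) := by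
              refine hpf.sublist ?_
              conv_rhs => rw [← List.takeWhile_append_dropWhile (p := fun b => decide (a < b)) (l := x :: xs)]
              exact List.Sublist.append_right (List.dropLast_sublist _) _
            have hpgnew : ys.Pairwise (fun p q => q ≤ p) := (List.pairwise_cons.mp hpg).2
            rw [ih a _ ys (ans + 1) hlet hpast hpfnew hpgnew hFnew]
            push_cast
            ring
          · -- no match: head of B does not beat a, scoreB stays a in both worlds
            have hxa : ¬ a < x := by
              rcases hxy with rfl | ⟨_, h2⟩
              · exact hab
              · exact absurd (lt_of_le_of_lt haM h2) hab
            have hscore : scoreLoop a a (x :: xs) = a := by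
              rw [scoreLoop, if_neg hxa]
            rw [solLoopA]
            simp only [hscore]
            rw [show gRecN (a :: t) (b :: ys) = gRecN t (b :: ys) by rw [gRecN]; simp [hab]]
            exact ih a (x :: xs) (b :: ys) ans hlet hpast hpf hpg
              ((List.Forall₂.cons hxy hrest).imp (fun _ _ h => relM_mono haM h))

lemma fold_eq_gRecN (bs : List Int) : ∀ (as : List Int) (j : Nat), j ≤ bs.length →
    as.foldl (fun j a => if j < bs.length ∧ a < bs.getD j 0 then j + 1 else j) j
      = j + gRecN as (bs.drop j) := by
  intro as
  induction as with
  | nil => intro j _; simp [gRecN]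
  | cons a t ih =>
      intro j hj
      by_cases h : j < bs.length ∧ a < bs.getD j 0
      · have hlt := h.1
        have hdrop : bs.drop j = bs[j] :: bs.drop (j+1) := List.drop_eq_getElem_cons hlt
        have hget : bs.getD j 0 = bs[j] := List.getD_eq_getElem bs 0 hlt
        simp only [List.foldl_cons, if_pos h]
        rw [ih (j+1) hlt, hdrop, gRecN]
        rw [hget] at h
        simp [h.2]
        omega
      · simp only [List.foldl_cons, if_neg h]
        rw [ih j hj]
        rcases Nat.lt_or_ge j bs.length with hlt | hge
        · have hget : bs.getD j 0 = bs[j] := List.getD_eq_getElem bs 0 hlt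
          have hble : ¬ a < bs[j] := fun hc => h ⟨hlt, by rw [hget]; exact hc⟩
          have hdrop : bs.drop j = bs[j] :: bs.drop (j+1) := List.drop_eq_getElem_cons hlt
          rw [hdrop, gRecN]
          simp [hble]
        · rw [List.drop_eq_nil_of_le hge]
          rfl

-- ===== VERDICT (by name: the statement is the Claim_ definition above) =====
theorem solution_spec : Claim_equal_solution := by
  intro A B _
  unfold Spec_solution solution solution_alt
  set as := PySem.List.sorted A (fun x => x) true with has
  set bs := PySem.List.sorted B (fun x => x) true with hbs
  have hfold := fold_eq_gRecN bs as 0 (Nat.zero_le _)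
  simp only [List.drop_zero, Nat.zero_add] at hfold
  show solLoopA bs as 0 = ((as.foldl (fun j a => if j < bs.length ∧ a < bs.getD j 0 then j + 1 else j) (0 : Nat) : Nat) : Int)
  rw [hfold]
  have hpas : as.Pairwise (fun p q => q ≤ p) := by
    have := PySem.List.sorted_pairwise_rev (xs := A) (key := fun x => x)
    simpa using this
  have hpbs : bs.Pairwise (fun p q => q ≤ p) := by
    have := PySem.List.sorted_pairwise_rev (xs := B) (key := fun x => x)
    simpa using this
  cases has' : as with
  | nil => simp [solLoopA, gRecN]
  | cons a0 t =>
      rw [has'] at hpas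
      have hle : ∀ x ∈ a0 :: t, x ≤ a0 := by
        intro x hx
        rcases List.mem_cons.mp hx with h | h
        · exact le_of_eq h
        · exact (List.pairwise_cons.mp hpas).1 x h
      have := main_lemma (a0 :: t) a0 bs bs 0 hle hpas hpbs hpbs
        (List.forall₂_same.mpr (fun x _ => Or.inl rfl))
      rw [this]
      simp
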